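-- pv_equiv track=rewrite | github.com/sriramnarendran/RepoFix | src/repofix/branch/cache.py | branch_slug
-- ===== SOURCE A (Python) =====
-- def branch_slug(branch: str) -> str:
--     """Convert a branch name to a safe, short filesystem slug.
--
--     Examples:
--       "main"            → "main"
--       "feature/my-work" → "feature-my-work"
--       "HEAD"            → "HEAD"
--     """
--     safe = (
--         branch
--         .replace("/", "-")
--         .replace("\\", "-")
--         .replace(" ", "-")
--         .replace(":", "-")
--     )
--     # Keep only alphanumeric, dash, underscore, dot
--     safe = "".join(c for c in safe if c.isalnum() or c in "-_.")
--     return safe[:48] or "branch"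
-- ===== SOURCE B (Python) =====
-- def branch_slug(branch: str) -> str:
--     """Output-bounded scan: emit at most 48 slug characters and stop scanning
--     as soon as the budget is spent; no intermediate strings, no truncation step."""
--     chars = []
--     i = 0
--     n = len(branch)
--     while i < n and len(chars) < 48:
--         c = branch[i]
--         if c in "/\\ :":
--             chars.append("-")
--         elif c.isalnum() or c in "-_.":
--             chars.append(c)
--         i += 1
--     return "".join(chars) or "branch"
-- ===== Notes on version B (the rewrite author's own statement) =====
-- stated objective: faster
-- what changed: A builds four fully replaced copies of the whole string, filters the whole result and then truncates; B is an output-bounded scan with a 48-character budget that stops reading the input as soon as the budget is spent, so it never materialises the transformed string nor scans past the 48th emitted character.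
import Mathlib
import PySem

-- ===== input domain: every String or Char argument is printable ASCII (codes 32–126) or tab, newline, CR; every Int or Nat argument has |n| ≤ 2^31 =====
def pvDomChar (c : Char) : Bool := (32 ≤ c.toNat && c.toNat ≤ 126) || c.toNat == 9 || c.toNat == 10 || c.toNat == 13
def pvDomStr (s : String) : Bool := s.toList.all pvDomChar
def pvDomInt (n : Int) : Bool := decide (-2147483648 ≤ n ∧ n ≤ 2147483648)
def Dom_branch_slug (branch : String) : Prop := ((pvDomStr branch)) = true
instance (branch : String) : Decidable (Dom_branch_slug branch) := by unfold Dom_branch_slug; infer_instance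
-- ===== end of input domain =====

-- B replaces A's four whole-string replace passes + filter + truncation by an
-- output-bounded scan with a 48-character budget that stops early; objective: faster.

-- ===== PORT A =====
def branch_slug (branch : String) : String :=
  let safe0 :=
    PySem.Chars.replace
      (PySem.Chars.replace
        (PySem.Chars.replace
          (PySem.Chars.replace branch.toList ['/'] ['-'])
          ['\\'] ['-'])
        [' '] ['-'])
      [':'] ['-']
  let safe := safe0.filter (fun c => PySem.Chars.isalnum c || (c == '-' || c == '_' || c == '.'))
  let r := PySem.Chars.slice safe none (some 48)
  if r.isEmpty then "branch" else String.ofList r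

-- ===== PORT B =====
-- the while loop of Source B: structural recursion on the remaining input, carrying the
-- remaining budget (48 - len(chars)); stops when input or budget runs out
def slugScan : List Char → Nat → List Char
  | [], _ => []
  | _ :: _, 0 => []
  | c :: t, b + 1 =>
    if c == '/' || c == '\\' || c == ' ' || c == ':' then '-' :: slugScan t b
    else if PySem.Chars.isalnum c || (c == '-' || c == '_' || c == '.') then c :: slugScan t b
    else slugScan t (b + 1)

def branch_slug_alt (branch : String) : String :=
  let r := slugScan branch.toList 48
  if r.isEmpty then "branch" else String.ofList r

-- ===== PRECONDITION & SPEC =====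
def Spec_branch_slug (branch : String) (out : String) : Prop := out = branch_slug_alt branch
instance (branch : String) (out : String) : Decidable (Spec_branch_slug branch out) := by unfold Spec_branch_slug; infer_instance

-- ===== CLAIM =====
def Claim_equal_branch_slug : Prop := ∀ (branch : String), Dom_branch_slug branch → Spec_branch_slug branch (branch_slug branch)

-- ===== LEMMAS AND PROOFS =====

-- single-character replace is a pointwise map
theorem replace_go_single (a b : Char) :
    ∀ (l : List Char) (fuel : Nat) (acc : List Char), l.length ≤ fuel →
      PySem.Chars.replace.go [a] [b] fuel l acc
        = acc.reverse ++ l.map (fun c => if c = a then b else c) := by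
  intro l
  induction l with
  | nil =>
      intro fuel acc _
      cases fuel <;> simp [PySem.Chars.replace.go]
  | cons c t ih =>
      intro fuel acc hle
      cases fuel with
      | zero => simp at hle
      | succ f =>
        simp only [PySem.Chars.replace.go, List.isPrefixOf]
        by_cases h : c = a
        · simp [h, ih f (b :: acc) (by simpa using hle)]
        · have : (a == c) = false := by simp [Ne.symm h]
          simp [this, h, ih f (c :: acc) (by simpa using hle)]

theorem replace_single (a b : Char) (l : List Char) :
    PySem.Chars.replace l [a] [b] = l.map (fun c => if c = a then b else c) := by
  simp [PySem.Chars.replace, replace_go_single a b l l.length [] (le_refl _)]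

-- B's bounded scan equals "map the separators, filter, take the budget"
theorem slugScan_eq (cs : List Char) :
    ∀ b : Nat,
      slugScan cs b
        = (((((cs.map (fun c => if c = '/' then '-' else c)).map
                (fun c => if c = '\\' then '-' else c)).map
                (fun c => if c = ' ' then '-' else c)).map
                (fun c => if c = ':' then '-' else c)).filter
              (fun c => PySem.Chars.isalnum c || (c == '-' || c == '_' || c == '.'))).take b := by
  induction cs with
  | nil => intro b; simp [slugScan]
  | cons c t ih =>
      intro b
      cases b with
      | zero => simp [slugScan]
      | succ n =>
          simp only [List.map_cons, List.filter_cons]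
          by_cases h1 : c = '/'
          · subst h1; simp [slugScan, ih]
          by_cases h2 : c = '\\'
          · subst h2; simp [slugScan, ih]
          by_cases h3 : c = ' '
          · subst h3; simp [slugScan, ih]
          by_cases h4 : c = ':'
          · subst h4; simp [slugScan, ih]
          have hsep : (c == '/' || c == '\\' || c == ' ' || c == ':') = false := by
            simp [h1, h2, h3, h4]
          simp only [slugScan, hsep, Bool.false_eq_true, if_false, if_neg h1, if_neg h2,
            if_neg h3, if_neg h4]
          cases hk : (PySem.Chars.isalnum c || (c == '-' || c == '_' || c == '.')) with
          | true => simp [ih]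
          | false => simp [ih]

theorem branch_slug_spec : Claim_equal_branch_slug := by
  intro branch _
  unfold Spec_branch_slug branch_slug branch_slug_alt
  simp only [replace_single, slugScan_eq, PySem.Chars.slice_eq_listSlice]
  rw [show (48 : Int) = ((48 : Nat) : Int) from rfl, PySem.List.slice_to_natCast]
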